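-- pv_equiv track=rewrite | github.com/wbf1015/DTDES-KGE | DTDES-KGE-code/DataLoader/QueryAwareSample_Reverse.py | count_frequency
-- ===== SOURCE A (Python) =====
-- def count_frequency(triples, start=4):
--     '''
--     Get frequency of a partial triple like (head, relation) or (relation, tail)
--     The frequency will be used for subsampling like word2vec
--     '''
--     count = {}
--     for head, relation, tail in triples:
--         if (head, relation) not in count:
--             count[(head, relation)] = start
--         else:
--             count[(head, relation)] += 1
--     return count
-- ===== SOURCE B (Python) =====
-- def count_frequency(triples, start=4):
--     '''
--     Get frequency of a partial triple like (head, relation) or (relation, tail)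
--     The frequency will be used for subsampling like word2vec
--     '''
--     pairs = [(head, relation) for head, relation, tail in triples]
--     return {pair: start + pairs.count(pair) - 1 for pair in dict.fromkeys(pairs)}
-- ===== Notes on version B (the rewrite author's own statement) =====
-- stated objective: alternative
-- what changed: Replaced A's single dict-building pass with a branch (seed with start, then increment) by a dedup-and-count formulation: extract the (head, relation) pair list, deduplicate it in first-occurrence order with dict.fromkeys, and build the result as {pair: start + pairs.count(pair) - 1}; trades A's O(n) pass for an O(n*k) count per distinct pair.
import Mathlib
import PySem

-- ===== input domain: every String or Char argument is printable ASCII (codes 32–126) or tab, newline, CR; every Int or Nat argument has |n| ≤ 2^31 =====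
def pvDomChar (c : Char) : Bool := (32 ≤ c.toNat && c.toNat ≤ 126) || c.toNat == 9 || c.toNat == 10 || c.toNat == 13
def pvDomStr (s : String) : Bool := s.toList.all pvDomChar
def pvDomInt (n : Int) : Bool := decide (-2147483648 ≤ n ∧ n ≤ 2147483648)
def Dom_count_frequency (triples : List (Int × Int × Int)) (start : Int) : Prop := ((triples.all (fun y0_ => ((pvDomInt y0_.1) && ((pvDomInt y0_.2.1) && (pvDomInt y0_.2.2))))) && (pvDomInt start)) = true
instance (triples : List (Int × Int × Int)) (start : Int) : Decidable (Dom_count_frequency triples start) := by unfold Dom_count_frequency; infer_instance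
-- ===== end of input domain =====

-- B replaces A's single dict-building pass with a branch (seed start, later increment) by a
-- dedup-and-count formulation: deduplicate the (head, relation) pairs in first-occurrence
-- order and map each to start + count - 1 (alternative decomposition, not faster).
-- The Python dict keyed by (head, relation) with Int value is rendered as the flattened
-- items list (head, relation, value) in insertion order.

-- ===== PORT A =====
def count_frequency (triples : List (Int × Int × Int)) (start : Int) :
    List (Int × Int × Int) :=
  let count := triples.foldl
    (fun d t =>
      if d.contains (t.1, t.2.1) = false then
        d.insert (t.1, t.2.1) start
      else
        d.insert (t.1, t.2.1) (d.getD (t.1, t.2.1) 0 + 1))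
    PySem.Dict.empty
  count.items.map (fun p => (p.1.1, p.1.2, p.2))

-- ===== PORT B =====
def count_frequency_alt (triples : List (Int × Int × Int)) (start : Int) :
    List (Int × Int × Int) :=
  let pairs := triples.map (fun t => (t.1, t.2.1))
  (PySem.List.dedup pairs).map
    (fun pair => (pair.1, pair.2, start + (pairs.count pair : Int) - 1))

-- ===== PRECONDITION & SPEC =====
def Spec_count_frequency (triples : List (Int × Int × Int)) (start : Int) (out : List (Int × Int × Int)) : Prop := out = count_frequency_alt triples start
instance (triples : List (Int × Int × Int)) (start : Int) (out : List (Int × Int × Int)) : Decidable (Spec_count_frequency triples start out) := by unfold Spec_count_frequency; infer_instance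

-- ===== CLAIM (what is proved, stated in full; the proofs are below) =====
def Claim_equal_count_frequency : Prop := ∀ (triples : List (Int × Int × Int)) (start : Int), Dom_count_frequency triples start → Spec_count_frequency triples start (count_frequency triples start)

-- ===== LEMMAS AND PROOFS =====

-- A's fold step as a single insert (both branches insert at the same key)
def pvStepA (start : Int) (d : PySem.Dict (Int × Int) Int) (t : Int × Int × Int) :
    PySem.Dict (Int × Int) Int :=
  d.insert (t.1, t.2.1)
    (if d.contains (t.1, t.2.1) = false then start else d.getD (t.1, t.2.1) 0 + 1)

lemma stepA_eq (start : Int) :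
    (fun (d : PySem.Dict (Int × Int) Int) (t : Int × Int × Int) =>
      if d.contains (t.1, t.2.1) = false then
        d.insert (t.1, t.2.1) start
      else
        d.insert (t.1, t.2.1) (d.getD (t.1, t.2.1) 0 + 1)) = pvStepA start := by
  funext d t
  unfold pvStepA
  split <;> simp_all

lemma pvStepA_def (start : Int) (d : PySem.Dict (Int × Int) Int) (t : Int × Int × Int) :
    pvStepA start d t = d.insert (t.1, t.2.1)
      (if d.contains (t.1, t.2.1) = false then start else d.getD (t.1, t.2.1) 0 + 1) := rfl

lemma keysA (start : Int) (l : List (Int × Int × Int)) :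
    (l.foldl (pvStepA start) PySem.Dict.empty).keys
      = PySem.Set.ofList (l.map (fun t => (t.1, t.2.1))) := by
  unfold pvStepA
  rw [PySem.Dict.keys_foldl_insert_key l (fun t => (t.1, t.2.1))]
  simp [PySem.Set.update_nil_left]

lemma nodupKeysA (start : Int) (l : List (Int × Int × Int)) :
    (l.foldl (pvStepA start) PySem.Dict.empty).keys.Nodup := by
  unfold pvStepA
  exact PySem.Dict.nodup_keys_foldl_insert_key l _ _ _ (by simp)

lemma containsA (start : Int) (l : List (Int × Int × Int)) (k : Int × Int) :
    (l.foldl (pvStepA start) PySem.Dict.empty).contains k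
      = decide (k ∈ l.map (fun t => (t.1, t.2.1))) := by
  rw [PySem.Dict.contains_eq_decide_mem_keys, keysA]
  simp [PySem.Set.mem_ofList]

lemma getDA (start : Int) (l : List (Int × Int × Int)) (k : Int × Int) :
    (l.foldl (pvStepA start) PySem.Dict.empty).getD k 0
      = if 0 < (l.map (fun t => (t.1, t.2.1))).count k then
          start + (l.map (fun t => (t.1, t.2.1))).count k - 1
        else 0 := by
  induction l using List.reverseRecOn with
  | nil => simp [PySem.Dict.getD_empty]
  | append_singleton l t ih =>
      rw [List.foldl_append, List.foldl_cons, List.foldl_nil]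
      rw [pvStepA_def, PySem.Dict.getD_insert, containsA, ih]
      by_cases hk : k = (t.1, t.2.1)
      · subst hk
        by_cases hm : (t.1, t.2.1) ∈ l.map (fun t => (t.1, t.2.1))
        · have hc : 0 < (l.map (fun t => (t.1, t.2.1))).count (t.1, t.2.1) :=
            List.count_pos_iff.mpr hm
          simp [hm, List.count_append]
          omega
        · have hc : (l.map (fun t => (t.1, t.2.1))).count (t.1, t.2.1) = 0 := by
            simpa using List.count_eq_zero.mpr hm
          simp [hm, List.count_append]
          rw [hc]; norm_num
      · have hne : ¬ (t.1, t.2.1) = k := fun h => hk (Eq.symm h)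
        have h1 : (l.map (fun t => (t.1, t.2.1)) ++ [(t.1, t.2.1)]).count k
            = (l.map (fun t => (t.1, t.2.1))).count k := by
          simp [List.count_append, hne]
        simp only [hk, if_false, List.map_append, List.map_cons, List.map_nil, h1]

-- ===== VERDICT (by name: the statement is the Claim_ definition above) =====
theorem count_frequency_spec : Claim_equal_count_frequency := by
  intro triples start _
  unfold Spec_count_frequency count_frequency count_frequency_alt
  dsimp only
  rw [stepA_eq]
  set xs := triples.map (fun t => (t.1, t.2.1)) with hxs
  rw [PySem.Dict.items_eq_map_keys _ (nodupKeysA start triples) 0, keysA, List.map_map,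
    PySem.List.dedup_eq_ofList]
  apply List.map_congr_left
  intro k hk
  have hm : k ∈ xs := (PySem.Set.mem_ofList _ _).mp hk
  have hc : 0 < xs.count k := List.count_pos_iff.mpr hm
  simp only [Function.comp, getDA, ← hxs]
  simp [hc]
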